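-- pv_equiv track=rewrite | github.com/06rajesh/intent-slot-classification-nlu | utils.py | get_word_with_limits
-- ===== SOURCE A (Python) =====
-- def get_word_with_limits(sentence: str) -> (list, list):
--     words = list()
--     limits = list()
--     start: int = 0
--
--     for c in range(0, len(sentence)):
--         if sentence[c] == " ":
--             word = sentence[start:c]
--             words.append(word)
--             limits.append([start, c - 1])
--             start = c + 1
--         elif c == len(sentence) - 1:
--             word = sentence[start:c+1]
--             words.append(word)
--             limits.append([start, c])
--     return words, limits
-- ===== SOURCE B (Python) =====
-- def get_word_with_limits(sentence: str) -> (list, list):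
--     if not sentence:
--         return [], []
--     words = sentence.split(" ")
--     if sentence.endswith(" "):
--         words = words[:-1]
--     limits = []
--     start = 0
--     for w in words:
--         limits.append([start, start + len(w) - 1])
--         start += len(w) + 1
--     return words, limits
-- ===== Notes on version B (the rewrite author's own statement) =====
-- stated objective: faster
-- what changed: A's Python-level char-by-char index scan with manual slicing is replaced by one sentence.split(" ") call plus a running-offset accumulation over the resulting words (trailing-space word dropped, empty sentence short-circuited).
import Mathlib
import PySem

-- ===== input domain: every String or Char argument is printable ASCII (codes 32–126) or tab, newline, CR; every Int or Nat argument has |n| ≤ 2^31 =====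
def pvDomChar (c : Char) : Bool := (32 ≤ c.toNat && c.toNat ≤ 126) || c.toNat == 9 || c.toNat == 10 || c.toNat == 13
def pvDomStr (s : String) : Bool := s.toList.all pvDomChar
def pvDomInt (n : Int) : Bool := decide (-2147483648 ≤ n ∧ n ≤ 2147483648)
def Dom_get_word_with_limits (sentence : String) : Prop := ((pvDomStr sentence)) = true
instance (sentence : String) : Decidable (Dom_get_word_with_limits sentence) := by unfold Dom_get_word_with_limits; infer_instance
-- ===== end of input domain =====

-- B replaces A's char-by-char index scan with a single split(" ") followed by a
-- running-offset accumulation over the resulting words (measured constant-factor faster).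

-- ===== PORT A =====
-- loop body of A's `for c in range(0, len(sentence))`; state = (words, limits, start)
def pvStepA (sentence : String) (n : Int) (st : List String × List (List Int) × Int)
    (c : Int) : List String × List (List Int) × Int :=
  if PySem.Str.pyGet? sentence c = some ' ' then
    (st.1 ++ [PySem.Str.slice sentence (some st.2.2) (some c)],
     st.2.1 ++ [[st.2.2, c - 1]], c + 1)
  else if c = n - 1 then
    (st.1 ++ [PySem.Str.slice sentence (some st.2.2) (some (c + 1))],
     st.2.1 ++ [[st.2.2, c]], st.2.2)
  else st


def get_word_with_limits (sentence : String) : List String × List (List Int) :=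
  let n : Int := PySem.Str.len sentence
  let r := (PySem.List.pyRange 0 n).foldl (pvStepA sentence n) ([], [], 0)
  (r.1, r.2.1)


-- ===== PORT B =====
-- loop body of B's `for w in words`; state = (limits, start)
def pvStepB (st : List (List Int) × Int) (w : String) : List (List Int) × Int :=
  (st.1 ++ [[st.2, st.2 + PySem.Str.len w - 1]], st.2 + PySem.Str.len w + 1)


def get_word_with_limits_alt (sentence : String) : List String × List (List Int) :=
  if sentence = "" then ([], [])
  else
    let parts := (PySem.Str.split? sentence " ").getD []
    let words := if PySem.Str.endswith sentence " " then PySem.List.slice parts none (some (-1)) else parts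
    let limits := (words.foldl pvStepB ([], 0)).1
    (words, limits)


-- ===== PRECONDITION & SPEC =====
def Spec_get_word_with_limits (sentence : String) (out : List String × List (List Int)) : Prop := out = get_word_with_limits_alt sentence
instance (sentence : String) (out : List String × List (List Int)) : Decidable (Spec_get_word_with_limits sentence out) := by unfold Spec_get_word_with_limits; infer_instance

-- ===== CLAIM (what is proved, stated in full; the proofs are below) =====
def Claim_equal_get_word_with_limits : Prop := ∀ (sentence : String), Dom_get_word_with_limits sentence → Spec_get_word_with_limits sentence (get_word_with_limits sentence)

-- ===== LEMMAS AND PROOFS =====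

-- reference splitter: what Python's sentence.split(" ") computes, as structural recursion
def pvSplit : List Char → List (List Char)
  | [] => [[]]
  | c :: t =>
    if c = ' ' then [] :: pvSplit t
    else match pvSplit t with
         | [] => [[c]]
         | h :: r => (c :: h) :: r

theorem pvSplit_ne_nil (t : List Char) : pvSplit t ≠ [] := by
  induction t with
  | nil => simp [pvSplit]
  | cons c t ih =>
    simp only [pvSplit]
    split
    · simp
    · split <;> simp

theorem pvGo (fuel : Nat) : ∀ (l : List Char) (cur : List Char) (acc : List (List Char)),
    l.length < fuel →
    PySem.Chars.splitOn.go [' '] fuel l cur acc = acc.reverse ++ (pvSplit l).modifyHead (cur.reverse ++ ·) := by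
  induction fuel with
  | zero => intro l cur acc h; omega
  | succ fuel ih =>
    intro l cur acc h
    match l with
    | [] =>
      rw [PySem.Chars.splitOn.go]
      simp [pvSplit]
      omega
    | c :: rest =>
      rw [PySem.Chars.splitOn.go]
      simp only [List.length_cons] at h
      by_cases hc : c = ' '
      · subst hc
        simp only [List.isPrefixOf, BEq.rfl, Bool.true_and, if_pos]
        rw [show List.drop [' '].length (' ' :: rest) = rest from rfl,
            ih rest [] (cur.reverse :: acc) (by omega)]
        simp only [pvSplit, List.modifyHead]
        rcases pvSplit rest with _ | ⟨h1, r⟩ <;> simp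
      · have hp : ([' '].isPrefixOf (c :: rest)) = false := by
          simp [List.isPrefixOf]; exact fun h' => absurd h'.symm hc
        rw [hp]
        simp only [Bool.false_eq_true, if_false]
        rw [ih rest (c :: cur) acc (by omega)]
        simp only [pvSplit, if_neg hc]
        rcases hs : pvSplit rest with _ | ⟨h1, r⟩
        · exact absurd hs (pvSplit_ne_nil rest)
        · simp [List.modifyHead]

theorem pvSplitOn_eq (s : List Char) : PySem.Chars.splitOn s [' '] = pvSplit s := by
  rw [PySem.Chars.splitOn, pvGo (s.length + 1) s [] [] (by omega)]
  rcases hs : pvSplit s with _ | ⟨h1, r⟩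
  · exact absurd hs (pvSplit_ne_nil s)
  · simp

def pvGl (t : List Char) : List Char := ((pvSplit t).getLast?).getD []

theorem pvSplit_concat_space (t : List Char) : pvSplit (t ++ [' ']) = pvSplit t ++ [[]] := by
  induction t with
  | nil => simp [pvSplit]
  | cons c t ih =>
    by_cases hc : c = ' '
    · subst hc; simp [pvSplit, ih]
    · simp only [List.cons_append, pvSplit, if_neg hc, ih]
      rcases hs : pvSplit t with _ | ⟨h1, r⟩
      · exact absurd hs (pvSplit_ne_nil t)
      · simp

theorem pvSplit_concat_char (t : List Char) (c : Char) (hc : c ≠ ' ') :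
    pvSplit (t ++ [c]) = (pvSplit t).dropLast ++ [pvGl t ++ [c]] := by
  induction t with
  | nil => simp [pvSplit, pvGl, if_neg hc]
  | cons a t ih =>
    by_cases ha : a = ' '
    · subst ha
      simp only [List.cons_append, pvSplit, ih]
      have hne := pvSplit_ne_nil t
      rcases hs : pvSplit t with _ | ⟨h1, r⟩
      · exact absurd hs hne
      · simp [pvGl, pvSplit, hs, List.dropLast_cons_of_ne_nil, List.getLast?_cons_cons]
    · simp only [List.cons_append, pvSplit, if_neg ha, ih]
      rcases hs : pvSplit t with _ | ⟨h1, r⟩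
      · exact absurd hs (pvSplit_ne_nil t)
      · rcases hr : r with _ | ⟨r1, rs⟩
        · simp [pvGl, pvSplit, if_neg ha, hs, hr]
        · simp [pvGl, pvSplit, if_neg ha, hs, hr]

theorem pvGl_concat_space (t : List Char) : pvGl (t ++ [' ']) = [] := by
  simp [pvGl, pvSplit_concat_space]

theorem pvGl_concat_char (t : List Char) (c : Char) (hc : c ≠ ' ') :
    pvGl (t ++ [c]) = pvGl t ++ [c] := by
  simp [pvGl, pvSplit_concat_char t c hc]

theorem pvDropLast_getLast?_getD {α : Type} (l : List α) (d : α) (h : l ≠ []) :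
    l.dropLast ++ [l.getLast?.getD d] = l := by
  induction l using List.reverseRecOn with
  | nil => exact absurd rfl h
  | append_singleton t c _ => simp

theorem pvSplit_eq_dropLast_gl (t : List Char) :
    pvSplit t = (pvSplit t).dropLast ++ [pvGl t] := by
  exact (pvDropLast_getLast?_getD (pvSplit t) [] (pvSplit_ne_nil t)).symm

theorem pvGl_len_le (t : List Char) : (pvGl t).length ≤ t.length := by
  induction t using List.reverseRecOn with
  | nil => simp [pvGl, pvSplit]
  | append_singleton t c ih =>
    by_cases hc : c = ' '
    · subst hc; simp [pvGl_concat_space]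
    · simp [pvGl_concat_char t c hc]; omega

theorem pvGl_drop (t : List Char) : t.drop (t.length - (pvGl t).length) = pvGl t := by
  induction t using List.reverseRecOn with
  | nil => simp [pvGl, pvSplit]
  | append_singleton t c ih =>
    by_cases hc : c = ' '
    · subst hc; simp [pvGl_concat_space]
    · have hle := pvGl_len_le t
      simp only [pvGl_concat_char t c hc, List.length_append, List.length_cons, List.length_nil]
      rw [show t.length + (0 + 1) - ((pvGl t).length + 1) = t.length - (pvGl t).length by omega,
          List.drop_append_of_le_length (by omega), ih]

def pvLim (ws : List (List Char)) : List (List Int) × Int :=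
  ws.foldl (fun st w => (st.1 ++ [[st.2, st.2 + (w.length : Int) - 1]], st.2 + (w.length : Int) + 1)) ([], 0)

theorem pvLim_concat (ws : List (List Char)) (w : List Char) :
    pvLim (ws ++ [w]) = ((pvLim ws).1 ++ [[(pvLim ws).2, (pvLim ws).2 + (w.length : Int) - 1]],
      (pvLim ws).2 + (w.length : Int) + 1) := by
  simp [pvLim, List.foldl_append]

theorem pvLim_snd (t : List Char) :
    (pvLim ((pvSplit t).dropLast)).2 = (t.length : Int) - (pvGl t).length := by
  induction t using List.reverseRecOn with
  | nil => simp [pvSplit, pvGl, pvLim]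
  | append_singleton t c ih =>
    by_cases hc : c = ' '
    · subst hc
      rw [pvSplit_concat_space, List.dropLast_concat, pvSplit_eq_dropLast_gl t, pvLim_concat]
      simp [pvGl_concat_space, ih]
    · rw [pvSplit_concat_char t c hc, List.dropLast_concat]
      rw [ih]
      simp [pvGl_concat_char t c hc]

def pvState (s : List Char) (m : Nat) : List String × List (List Int) × Int :=
  ((((pvSplit (s.take m)).dropLast).map String.ofList),
   (pvLim ((pvSplit (s.take m)).dropLast)).1,
   (pvLim ((pvSplit (s.take m)).dropLast)).2)

-- the slice A takes at a space (or at the end) equals the current last segment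
theorem pvSlice_eq (sentence : String) (m : Nat) (hm : m ≤ sentence.toList.length) :
    PySem.Str.slice sentence (some ((pvLim ((pvSplit (sentence.toList.take m)).dropLast)).2))
        (some (m : Int)) = String.ofList (pvGl (sentence.toList.take m)) := by
  set s := sentence.toList with hs
  set tm := s.take m with htm
  have hlen : tm.length = m := by simp [htm]; omega
  have hle : (pvGl tm).length ≤ m := hlen ▸ pvGl_len_le tm
  have hS : (pvLim ((pvSplit tm).dropLast)).2 = ((m - (pvGl tm).length : Nat) : Int) := by
    rw [pvLim_snd tm, hlen]; omega
  rw [hS]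
  unfold PySem.Str.slice
  rw [PySem.Chars.slice_eq_listSlice, PySem.List.slice_natCast]
  have h1 : List.drop (m - (pvGl tm).length) tm = pvGl tm := by
    have h := pvGl_drop tm; rwa [hlen] at h
  rw [htm, List.drop_take] at h1
  rw [← hs, h1]

theorem pvGet (sentence : String) (m : Nat) (hm : m < sentence.toList.length) :
    PySem.Str.pyGet? sentence (m : Int) = some (sentence.toList[m]'hm) := by
  simp [PySem.Str.pyGet?]

theorem pvTake_succ (s : List Char) (m : Nat) (hm : m < s.length) :
    s.take (m + 1) = s.take m ++ [s[m]'hm] := by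
  rw [List.take_add_one, List.getElem?_eq_getElem hm]
  rfl

theorem pvStepA_space (sentence : String) (m : Nat) (hm : m < sentence.toList.length)
    (hsp : sentence.toList[m]'hm = ' ') :
    pvStepA sentence ((sentence.toList.length : Int)) (pvState sentence.toList m) ((m : Int)) =
      pvState sentence.toList (m + 1) := by
  set s := sentence.toList with hs
  set tm := s.take m with htm
  have hlen : tm.length = m := by simp [htm]; omega
  have hle : (pvGl tm).length ≤ m := hlen ▸ pvGl_len_le tm
  have hS : (pvLim ((pvSplit tm).dropLast)).2 = (m : Int) - (pvGl tm).length := by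
    rw [pvLim_snd tm, hlen]
  have hsucc : s.take (m+1) = tm ++ [' '] := by rw [pvTake_succ s m hm, hsp]
  unfold pvStepA pvState
  rw [pvGet sentence m hm, if_pos (by rw [hsp]), hsucc, pvSplit_concat_space,
      List.dropLast_concat]
  refine Prod.ext ?_ (Prod.ext ?_ ?_)
  · show List.map String.ofList ((pvSplit tm).dropLast) ++ [_] = List.map String.ofList (pvSplit tm)
    conv_rhs => rw [pvSplit_eq_dropLast_gl tm]
    rw [List.map_append]
    congr 1
    rw [List.map_singleton]
    congr 1
    exact pvSlice_eq sentence m hm.le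
  · show (pvLim ((pvSplit tm).dropLast)).1 ++ [[_, (m : Int) - 1]] = (pvLim (pvSplit tm)).1
    conv_rhs => rw [pvSplit_eq_dropLast_gl tm, pvLim_concat]
    rw [hS]
    ring_nf
  · show (m : Int) + 1 = (pvLim (pvSplit tm)).2
    conv_rhs => rw [pvSplit_eq_dropLast_gl tm, pvLim_concat]
    simp only []
    rw [hS]
    omega

theorem pvState_succ_nonspace (s : List Char) (m : Nat) (hm : m < s.length)
    (hsp : s[m]'hm ≠ ' ') : pvState s (m + 1) = pvState s m := by
  unfold pvState
  rw [pvTake_succ s m hm, pvSplit_concat_char _ _ hsp, List.dropLast_concat]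

theorem pvStepA_mid (sentence : String) (m : Nat) (hm : m < sentence.toList.length)
    (hne : (m : Int) ≠ (sentence.toList.length : Int) - 1)
    (hsp : sentence.toList[m]'hm ≠ ' ') :
    pvStepA sentence ((sentence.toList.length : Int)) (pvState sentence.toList m) ((m : Int)) =
      pvState sentence.toList (m + 1) := by
  unfold pvStepA
  rw [pvGet sentence m hm, if_neg (by simpa using hsp), if_neg hne,
      pvState_succ_nonspace sentence.toList m hm hsp]

theorem pvInv (sentence : String) (m : Nat) (hm : m < sentence.toList.length + 1)
    (hm2 : m ≤ sentence.toList.length - 1 ∨ m = 0) :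
    ((List.range m).map (fun k : Nat => (k : Int))).foldl
      (pvStepA sentence (sentence.toList.length : Int)) ([], [], 0) = pvState sentence.toList m := by
  induction m with
  | zero => simp [pvState, pvSplit, pvLim]
  | succ m ih =>
    have hmn : m + 1 ≤ sentence.toList.length - 1 := by
      rcases hm2 with h | h
      · exact h
      · omega
    have hmlt : m < sentence.toList.length := by omega
    rw [List.range_succ, List.map_append, List.foldl_append,
        ih (by omega) (by omega)]
    simp only [List.map_singleton, List.foldl_cons, List.foldl_nil]
    by_cases hsp : sentence.toList[m]'hmlt = ' '
    · exact pvStepA_space sentence m hmlt hsp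
    · exact pvStepA_mid sentence m hmlt (by omega) hsp

theorem pvSingleton_suffix (l : List Char) (a : Char) : [a] <:+ l ↔ l.getLast? = some a := by
  constructor
  · rintro ⟨p, rfl⟩
    simp
  · intro h
    rcases l.eq_nil_or_concat with rfl | ⟨t, c, rfl⟩
    · simp at h
    · simp at h
      exact ⟨t, by rw [h, List.concat_eq_append]⟩

theorem pvFoldB (ws : List (List Char)) :
    List.foldl pvStepB ([], 0) (ws.map String.ofList) = pvLim ws := by
  rw [List.foldl_map]
  unfold pvLim
  congr 1
  funext st w
  simp [pvStepB, PySem.Str.len_eq, String.toList_ofList]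

theorem pvAltB (sentence : String) (h : sentence.toList ≠ []) :
    get_word_with_limits_alt sentence =
      ((if sentence.toList.getLast? = some ' ' then (pvSplit sentence.toList).dropLast
        else pvSplit sentence.toList).map String.ofList,
       (pvLim (if sentence.toList.getLast? = some ' ' then (pvSplit sentence.toList).dropLast
        else pvSplit sentence.toList)).1) := by
  have hne : sentence ≠ "" := fun h' => h (by rw [h']; rfl)
  unfold get_word_with_limits_alt
  rw [if_neg hne]
  have hparts : (PySem.Str.split? sentence " ").getD [] =
      (pvSplit sentence.toList).map String.ofList := by
    unfold PySem.Str.split?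
    rw [show (" ".toList) = [' '] from rfl]
    unfold PySem.Chars.split?
    simp [pvSplitOn_eq]
  have hends : PySem.Str.endswith sentence " " =
      decide (sentence.toList.getLast? = some ' ') := by
    unfold PySem.Str.endswith
    rcases hb : PySem.Chars.endswith sentence.toList (" ".toList) with _|_
    · have := (PySem.Chars.endswith_iff sentence.toList [' ']).symm
      have h2 : ¬ ([' '] <:+ sentence.toList) := by
        intro hsuf
        rw [show (" ".toList) = [' '] from rfl] at hb
        rw [← PySem.Chars.endswith_iff] at hsuf
        simp [hb] at hsuf
      rw [pvSingleton_suffix] at h2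
      simp [h2]
    · rw [show (" ".toList) = [' '] from rfl] at hb
      have h2 := (PySem.Chars.endswith_iff sentence.toList [' ']).mp hb
      rw [pvSingleton_suffix] at h2
      simp [h2]
  simp only [hparts, hends]
  by_cases hlast : sentence.toList.getLast? = some ' '
  · simp only [hlast, decide_true, if_true]
    rw [PySem.List.slice_to_neg_one, ← List.map_dropLast, pvFoldB]
  · simp only [hlast, decide_false, Bool.false_eq_true, if_false]
    rw [pvFoldB]

theorem pvMain (sentence : String) :
    get_word_with_limits sentence = get_word_with_limits_alt sentence := by
  by_cases hnil : sentence.toList = []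
  · have hse : sentence = "" := by
      have := congrArg String.ofList hnil
      rwa [String.ofList_toList] at this
    subst hse
    decide
  · obtain ⟨k, hk⟩ : ∃ k, sentence.toList.length = k + 1 :=
      ⟨sentence.toList.length - 1, by have := List.length_pos_of_ne_nil hnil; omega⟩
    have hklt : k < sentence.toList.length := by omega
    have hA : get_word_with_limits sentence =
        (((PySem.List.pyRange 0 ((sentence.toList.length : Int))).foldl
            (pvStepA sentence ((sentence.toList.length : Int))) ([], [], 0)).1,
         ((PySem.List.pyRange 0 ((sentence.toList.length : Int))).foldl
            (pvStepA sentence ((sentence.toList.length : Int))) ([], [], 0)).2.1) := rfl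
    rw [hA, PySem.List.pyRange_zero_natCast,
        show List.range sentence.toList.length = List.range k ++ [k] by rw [hk, List.range_succ],
        List.map_append, List.foldl_append, pvInv sentence k (by omega) (Or.inl (by omega))]
    simp only [List.map_singleton, List.foldl_cons, List.foldl_nil]
    have htk1 : sentence.toList.take (k + 1) = sentence.toList := List.take_of_length_le (le_of_eq hk)
    by_cases hsp : sentence.toList[k]'hklt = ' '
    · rw [pvStepA_space sentence k hklt hsp]
      have hlast : sentence.toList.getLast? = some ' ' := by
        rw [List.getLast?_eq_getElem?, hk]
        simp [List.getElem?_eq_getElem hklt, hsp]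
      rw [pvAltB sentence hnil, if_pos hlast]
      unfold pvState
      rw [htk1]
    · -- final elif branch
      have hlast : ¬ (sentence.toList.getLast? = some ' ') := by
        rw [List.getLast?_eq_getElem?, hk]
        simp [List.getElem?_eq_getElem hklt]
        exact hsp
      have hcons : sentence.toList = sentence.toList.take k ++ [sentence.toList[k]'hklt] := by
        rw [← pvTake_succ sentence.toList k hklt, htk1]
      have hlen : (sentence.toList.take k).length = k := by rw [List.length_take]; omega
      have hgl : pvGl sentence.toList = pvGl (sentence.toList.take k) ++ [sentence.toList[k]'hklt] := by
        conv_lhs => rw [hcons]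
        exact pvGl_concat_char _ _ hsp
      have hsplit : pvSplit sentence.toList =
          (pvSplit (sentence.toList.take k)).dropLast ++ [pvGl sentence.toList] := by
        conv_lhs => rw [hcons]
        rw [pvSplit_concat_char _ _ hsp, hgl]
      have hLe : (pvGl (sentence.toList.take k)).length ≤ k := by
        have := pvGl_len_le (sentence.toList.take k); omega
      have hSk : (pvLim ((pvSplit (sentence.toList.take k)).dropLast)).2 =
          (k : Int) - ((pvGl (sentence.toList.take k)).length : Int) := by
        rw [pvLim_snd, hlen]
      have hSeq : (pvLim ((pvSplit (sentence.toList.take k)).dropLast)).2 =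
          (pvLim ((pvSplit (sentence.toList.take (k+1))).dropLast)).2 := by
        rw [hSk, htk1, pvLim_snd, hk, hgl]
        simp only [List.length_append, List.length_cons, List.length_nil]
        push_cast
        omega
      unfold pvStepA
      rw [pvGet sentence k hklt, if_neg (by simpa using hsp),
          if_pos (by rw [hk]; push_cast; ring)]
      rw [pvAltB sentence hnil, if_neg hlast]
      unfold pvState
      refine Prod.ext ?_ ?_
      · show List.map String.ofList ((pvSplit (sentence.toList.take k)).dropLast) ++ [_] =
          List.map String.ofList (pvSplit sentence.toList)
        rw [hsplit, List.map_append, List.map_singleton]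
        congr 2
        rw [hSeq]
        have hcast : ((k : Int) + 1) = (((k+1 : Nat)) : Int) := by push_cast; ring
        rw [hcast]
        exact (pvSlice_eq sentence (k+1) (by omega)).trans (by rw [htk1])
      · show (pvLim ((pvSplit (sentence.toList.take k)).dropLast)).1 ++ [[_, (k : Int)]] =
          (pvLim (pvSplit sentence.toList)).1
        rw [hsplit, pvLim_concat]
        congr 3
        congr 1
        rw [hSk, hgl]
        simp only [List.length_append, List.length_cons, List.length_nil]
        push_cast
        ring

-- ===== VERDICT (by name: the statement is the Claim_ definition above) =====
theorem get_word_with_limits_spec : Claim_equal_get_word_with_limits := by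
  intro sentence _
  unfold Spec_get_word_with_limits
  exact pvMain sentence
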